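-- pv_equiv track=rewrite | github.com/derekdperez/generate_income.sh | fozzy.py | select_max_parameter_permutations
-- ===== SOURCE A (Python) =====
-- def select_max_parameter_permutations(permutations: list[tuple[str, ...]]) -> list[tuple[str, ...]]:
--     non_empty = [item for item in permutations if item]
--     if not non_empty:
--         return []
--     max_len = max(len(item) for item in non_empty)
--     selected: list[tuple[str, ...]] = []
--     seen: set[tuple[str, ...]] = set()
--     for item in non_empty:
--         if len(item) != max_len:
--             continue
--         if item in seen:
--             continue
--         seen.add(item)
--         selected.append(item)
--     return selected
-- ===== SOURCE B (Python) =====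
-- def select_max_parameter_permutations(permutations: list[tuple[str, ...]]) -> list[tuple[str, ...]]:
--     # Single forward pass: running maximum length with reset; the output list
--     # itself (always duplicate-free) serves as the seen-set.
--     best_len = 0
--     selected: list[tuple[str, ...]] = []
--     for item in permutations:
--         n = len(item)
--         if n > best_len:
--             best_len = n
--             selected = [item]
--         elif n == best_len and n > 0 and item not in selected:
--             selected.append(item)
--     return selected
-- ===== Notes on version B (the rewrite author's own statement) =====
-- stated objective: simpler
-- what changed: Replaces A's three passes (filter non-empty, compute max length, dedup-scan with an auxiliary seen-set) by one forward pass that keeps a running maximum length, resetting the result list on a new maximum and using the duplicate-free result list itself as the seen-set.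
import Mathlib
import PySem

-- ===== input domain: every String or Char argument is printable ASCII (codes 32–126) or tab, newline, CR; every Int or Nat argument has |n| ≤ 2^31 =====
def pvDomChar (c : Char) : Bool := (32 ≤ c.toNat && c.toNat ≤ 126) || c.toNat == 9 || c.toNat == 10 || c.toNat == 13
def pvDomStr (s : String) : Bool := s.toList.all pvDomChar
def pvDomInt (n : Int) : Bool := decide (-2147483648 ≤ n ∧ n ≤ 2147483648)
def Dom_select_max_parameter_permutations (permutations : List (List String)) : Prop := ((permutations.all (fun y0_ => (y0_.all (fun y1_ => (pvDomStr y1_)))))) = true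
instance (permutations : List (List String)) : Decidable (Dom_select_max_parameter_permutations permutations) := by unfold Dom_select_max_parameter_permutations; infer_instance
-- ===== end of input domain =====

-- B replaces A's three passes (filter non-empty, compute max length, dedup-scan with a seen-set)
-- by one forward pass keeping a running maximum length; objective: simpler (no speed claim).


-- ===== PORT A =====
def select_max_parameter_permutations (permutations : List (List String)) : List (List String) :=
  let non_empty := permutations.filter (fun item => !item.isEmpty)
  if non_empty.isEmpty then []
  else
    -- max over a non-empty iterable; the .getD 0 default is unreachable (non_empty ≠ [])
    let max_len : Int := (PySem.List.max? (non_empty.map (fun item => (item.length : Int))) id).getD 0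
    (non_empty.foldl
      (fun (st : List (List String) × PySem.Set (List String)) item =>
        if (item.length : Int) ≠ max_len then st
        else if st.2.contains item then st
        else (st.1 ++ [item], st.2.add item))
      ([], PySem.Set.empty)).1

-- ===== PORT B =====
def select_max_parameter_permutations_alt (permutations : List (List String)) : List (List String) :=
  (permutations.foldl
    (fun (st : Int × List (List String)) item =>
      if st.1 < (item.length : Int) then ((item.length : Int), [item])
      else if (item.length : Int) = st.1 ∧ 0 < (item.length : Int) ∧ st.2.contains item = false
        then (st.1, st.2 ++ [item])
      else st)
    ((0 : Int), ([] : List (List String)))).2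

-- ===== PRECONDITION & SPEC =====
def Spec_select_max_parameter_permutations (permutations : List (List String)) (out : List (List String)) : Prop := out = select_max_parameter_permutations_alt permutations
instance (permutations : List (List String)) (out : List (List String)) : Decidable (Spec_select_max_parameter_permutations permutations out) := by unfold Spec_select_max_parameter_permutations; infer_instance

-- ===== CLAIM (what is proved, stated in full; the proofs are below) =====
def Claim_equal_select_max_parameter_permutations : Prop := ∀ (permutations : List (List String)), Dom_select_max_parameter_permutations permutations → Spec_select_max_parameter_permutations permutations (select_max_parameter_permutations permutations)

-- ===== LEMMAS AND PROOFS =====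

-- Proof-side names for the two loop bodies and the running maximum.
def pvLen (i : List String) : Int := (i.length : Int)

def stepA (m : Int) (st : List (List String) × PySem.Set (List String)) (item : List String) :
    List (List String) × PySem.Set (List String) :=
  if pvLen item ≠ m then st
  else if st.2.contains item then st
  else (st.1 ++ [item], st.2.add item)

def stepB (st : Int × List (List String)) (item : List String) : Int × List (List String) :=
  if st.1 < pvLen item then (pvLen item, [item])
  else if pvLen item = st.1 ∧ 0 < pvLen item ∧ st.2.contains item = false
    then (st.1, st.2 ++ [item])
  else st

def pvMxF (c : Int) (xs : List (List String)) : Int := xs.foldl (fun a i => max a (pvLen i)) c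

lemma a_eq (p : List (List String)) : select_max_parameter_permutations p =
    (if (p.filter (fun item => !item.isEmpty)).isEmpty then []
     else ((p.filter (fun item => !item.isEmpty)).foldl
        (stepA ((PySem.List.max? ((p.filter (fun item => !item.isEmpty)).map
          (fun item => (item.length : Int))) id).getD 0))
        ([], PySem.Set.empty)).1) := rfl

lemma alt_eq (p : List (List String)) :
    select_max_parameter_permutations_alt p = (p.foldl stepB ((0 : Int), [])).2 := rfl

lemma pvLen_nonneg (i : List String) : 0 ≤ pvLen i := by simp [pvLen]

lemma pvMxF_cons (c : Int) (i : List String) (t : List (List String)) :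
    pvMxF c (i :: t) = pvMxF (max c (pvLen i)) t := rfl

lemma pvMxF_eq_max (xs : List (List String)) : ∀ c : Int, 0 ≤ c →
    pvMxF c xs = max c (pvMxF 0 xs) := by
  induction xs with
  | nil => intro c hc; simp [pvMxF]; omega
  | cons i t ih =>
    intro c hc
    have hl := pvLen_nonneg i
    rw [pvMxF_cons, pvMxF_cons, ih (max c (pvLen i)) (by omega),
        ih (max 0 (pvLen i)) (by omega)]
    omega

lemma le_pvMx (xs : List (List String)) : 0 ≤ pvMxF 0 xs ∧ ∀ i ∈ xs, pvLen i ≤ pvMxF 0 xs := by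
  have h : pvMxF 0 xs = (xs.map pvLen).foldl max 0 := by
    simp [pvMxF, List.foldl_map]
  obtain ⟨h0, hmem⟩ := PySem.List.le_foldl_max (xs.map pvLen) (0 : Int)
  rw [h]
  exact ⟨h0, fun i hi => hmem _ (List.mem_map_of_mem hi)⟩

lemma mx_filter (xs : List (List String)) : ∀ c : Int, 0 ≤ c →
    pvMxF c (xs.filter (fun item => !item.isEmpty)) = pvMxF c xs := by
  induction xs with
  | nil => intro c _; rfl
  | cons i t ih =>
    intro c hc
    by_cases he : i.isEmpty
    · have hl : pvLen i = 0 := by simp [pvLen, List.isEmpty_iff.mp he]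
      rw [List.filter_cons_of_neg (by simp [he]), pvMxF_cons, hl,
          show max c 0 = c by omega]
      exact ih c hc
    · rw [List.filter_cons_of_pos (by simp [he]), pvMxF_cons, pvMxF_cons]
      exact ih _ (by have := pvLen_nonneg i; omega)

-- dropping the non-emptiness conjunct from the filter is harmless when the target length is positive
lemma filter_len_pos (p : List (List String)) (M : Int) (hM : 0 < M) :
    p.filter (fun i => pvLen i == M && !i.isEmpty) = p.filter (fun i => pvLen i == M) := by
  apply List.filter_congr
  intro x _
  by_cases hx : pvLen x = M
  · have hne : x.isEmpty = false := by
      rw [List.isEmpty_eq_false_iff]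
      intro hxe
      rw [hxe] at hx
      simp [pvLen] at hx
      omega
    simp [hx, hne]
  · simp [hx]

-- B's loop, fully characterised for any admissible start state.
lemma Bloop (xs : List (List String)) : ∀ (b : Int) (s : List (List String)), 0 ≤ b →
    xs.foldl stepB (b, s) =
      if b < pvMxF 0 xs
      then (pvMxF 0 xs, PySem.Set.ofList (xs.filter (fun i => pvLen i == pvMxF 0 xs)))
      else (b, (xs.filter (fun i => pvLen i == b && !i.isEmpty)).foldl PySem.Set.add s) := by
  induction xs with
  | nil =>
    intro b s hb
    rw [if_neg (by simp [pvMxF]; omega)]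
    rfl
  | cons i t ih =>
    intro b s hb
    have hl := pvLen_nonneg i
    have hMt := (le_pvMx t).1
    have hmx : pvMxF 0 (i :: t) = max (pvLen i) (pvMxF 0 t) := by
      rw [pvMxF_cons, pvMxF_eq_max t (max 0 (pvLen i)) (by omega)]
      omega
    simp only [hmx, List.foldl_cons]
    by_cases h1 : b < pvLen i
    · have hstep : stepB (b, s) i = (pvLen i, [i]) := by
        simp only [stepB]
        rw [if_pos h1]
      rw [hstep, ih (pvLen i) [i] (by omega)]
      by_cases h2 : pvLen i < pvMxF 0 t
      · rw [if_pos h2, if_pos (by omega), show max (pvLen i) (pvMxF 0 t) = pvMxF 0 t by omega,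
            List.filter_cons_of_neg (by simp [show pvLen i ≠ pvMxF 0 t by omega])]
      · rw [if_neg h2, if_pos (by omega), show max (pvLen i) (pvMxF 0 t) = pvLen i by omega,
            List.filter_cons_of_pos (by simp)]
        have hofl : PySem.Set.ofList (i :: t.filter (fun x => pvLen x == pvLen i))
            = (t.filter (fun x => pvLen x == pvLen i)).foldl PySem.Set.add [i] := by
          simp [PySem.Set.ofList, PySem.Set.add, PySem.Set.empty, PySem.Set.contains]
        rw [hofl, filter_len_pos t (pvLen i) (by omega)]
    · by_cases h2 : pvLen i = b ∧ 0 < pvLen i ∧ s.contains i = false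
      · have hstep : stepB (b, s) i = (b, s ++ [i]) := by
          simp only [stepB]
          rw [if_neg h1, if_pos h2]
        have hlb : pvLen i = b := h2.1
        rw [hstep, ih b (s ++ [i]) hb]
        by_cases hm : b < pvMxF 0 t
        · rw [if_pos hm, if_pos (by omega), show max (pvLen i) (pvMxF 0 t) = pvMxF 0 t by omega,
              List.filter_cons_of_neg (by simp [show pvLen i ≠ pvMxF 0 t by omega])]
        · rw [if_neg hm, if_neg (by omega),
              List.filter_cons_of_pos (by
                have : i.isEmpty = false := by
                  rw [List.isEmpty_eq_false_iff]
                  intro hxe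
                  rw [hxe] at hlb
                  simp [pvLen] at hlb
                  omega
                simp [hlb, this]),
              List.foldl_cons,
              show PySem.Set.add s i = s ++ [i] by
                have hni : i ∉ s := by simpa using h2.2.2
                simp [PySem.Set.add, PySem.Set.contains, hni]]
      · have hstep : stepB (b, s) i = (b, s) := by
          simp only [stepB]
          rw [if_neg h1, if_neg h2]
        rw [hstep, ih b s hb]
        by_cases hm : b < pvMxF 0 t
        · rw [if_pos hm, if_pos (by omega), show max (pvLen i) (pvMxF 0 t) = pvMxF 0 t by omega,
              List.filter_cons_of_neg (by
                have : pvLen i ≤ b := by omega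
                simp [show pvLen i ≠ pvMxF 0 t by omega])]
        · rw [if_neg hm, if_neg (by omega)]
          by_cases hib : pvLen i = b
          · by_cases hie : i.isEmpty
            · rw [List.filter_cons_of_neg (by simp [hie])]
            · have hpos : 0 < pvLen i := by
                have : i.length ≠ 0 := fun h0 =>
                  hie (List.isEmpty_iff.mpr (List.length_eq_zero_iff.mp h0))
                simp only [pvLen]; omega
              have hcont : i ∈ s := by
                by_contra hni
                exact h2 ⟨hib, hpos, by simpa using hni⟩
              rw [List.filter_cons_of_pos (by simp [hib, hie]), List.foldl_cons,
                  show PySem.Set.add s i = s by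
                    simp [PySem.Set.add, PySem.Set.contains, hcont]]
          · rw [List.filter_cons_of_neg (by simp [hib])]

-- A's loop: selected and seen stay equal, and the loop is a fold of Set.add over the filtered list.
lemma Aloop (m : Int) (ys : List (List String)) : ∀ s : List (List String),
    ys.foldl (stepA m) (s, s) =
      ((ys.filter (fun i => pvLen i == m)).foldl PySem.Set.add s,
       (ys.filter (fun i => pvLen i == m)).foldl PySem.Set.add s) := by
  induction ys with
  | nil => intro s; rfl
  | cons i t ih =>
    intro s
    rw [List.foldl_cons]
    by_cases hm : pvLen i = m
    · rw [List.filter_cons_of_pos (by simp [hm]), List.foldl_cons]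
      by_cases hc : i ∈ s
      · have hstep : stepA m (s, s) i = (s, s) := by
          simp only [stepA]
          rw [if_neg (by omega), if_pos (by simpa [PySem.Set.contains] using hc)]
        have hadd : PySem.Set.add s i = s := by
          simp [PySem.Set.add, PySem.Set.contains, hc]
        rw [hstep, hadd, ih s]
      · have hadd : PySem.Set.add s i = s ++ [i] := by
          simp [PySem.Set.add, PySem.Set.contains, hc]
        have hstep : stepA m (s, s) i = (s ++ [i], s ++ [i]) := by
          simp only [stepA]
          rw [if_neg (by omega), if_neg (by simpa [PySem.Set.contains] using hc)]
          rw [hadd]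
        rw [hstep, hadd, ih (s ++ [i])]
    · rw [show stepA m (s, s) i = (s, s) from by simp only [stepA]; rw [if_pos (by omega)],
          List.filter_cons_of_neg (by simp [hm]), ih s]

-- Python's max over a non-empty iterable, as a foldl of Int.max.
lemma max?_id_cons (l : List Int) : ∀ c : Int,
    PySem.List.max? (c :: l) id = some (l.foldl max c) := by
  induction l with
  | nil => intro c; rfl
  | cons x t ih =>
    intro c
    have h1 : PySem.List.max? (c :: x :: t) id = PySem.List.max? (max c x :: t) id := by
      simp only [PySem.List.max?, List.foldl_cons, id_eq]
      by_cases h : c < x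
      · rw [if_pos h, max_eq_right (by omega)]
      · rw [if_neg h, max_eq_left (by omega)]
    rw [h1, ih, List.foldl_cons]

-- ===== VERDICT (by name: the statement is the Claim_ definition above) =====
theorem select_max_parameter_permutations_spec : Claim_equal_select_max_parameter_permutations := by
  intro p _
  show select_max_parameter_permutations p = select_max_parameter_permutations_alt p
  rw [a_eq, alt_eq, Bloop p 0 [] le_rfl]
  by_cases hE : (p.filter (fun item => !item.isEmpty)).isEmpty
  · rw [if_pos hE]
    have hnil : p.filter (fun item => !item.isEmpty) = [] := List.isEmpty_iff.mp hE
    have hM : pvMxF 0 p = 0 := by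
      rw [← mx_filter p 0 le_rfl, hnil]; rfl
    rw [if_neg (by omega)]
    have hfe : p.filter (fun i => pvLen i == (0 : Int) && !i.isEmpty) = [] := by
      rw [List.filter_eq_nil_iff]
      intro x _
      by_cases hxe : x.isEmpty
      · simp [hxe]
      · have : pvLen x ≠ 0 := by
          simp only [pvLen]
          intro h0
          exact hxe (List.isEmpty_iff.mpr (List.length_eq_zero_iff.mp (by exact_mod_cast h0)))
        simp [this]
    rw [hfe]
    rfl
  · rw [if_neg hE]
    have hnn : p.filter (fun item => !item.isEmpty) ≠ [] := by
      intro h0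
      rw [h0] at hE
      exact hE rfl
    obtain ⟨x, t', hcons⟩ := List.exists_cons_of_ne_nil hnn
    have hx_mem : x ∈ p.filter (fun item => !item.isEmpty) := by
      rw [hcons]; exact List.mem_cons_self
    have hx_ne : x.isEmpty = false := by
      have := List.of_mem_filter hx_mem
      simpa using this
    have h1x : 1 ≤ pvLen x := by
      have : x.length ≠ 0 := by
        intro h0; simp at hx_ne
        exact hx_ne (List.length_eq_zero_iff.mp h0)
      simp only [pvLen]; omega
    have hMfil : pvMxF 0 (p.filter (fun item => !item.isEmpty)) = pvMxF 0 p :=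
      mx_filter p 0 le_rfl
    have hMp : 0 < pvMxF 0 p := by
      have hle := (le_pvMx (p.filter (fun item => !item.isEmpty))).2 x hx_mem
      omega
    have hm : (PySem.List.max? ((p.filter (fun item => !item.isEmpty)).map
        (fun item => (item.length : Int))) id).getD 0 = pvMxF 0 p := by
      rw [hcons]
      rw [List.map_cons, max?_id_cons, Option.getD_some, List.foldl_map]
      show pvMxF (pvLen x) t' = pvMxF 0 p
      rw [pvMxF_eq_max t' (pvLen x) (by omega), ← hMfil, hcons, pvMxF_cons,
          pvMxF_eq_max t' (max 0 (pvLen x)) (by omega)]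
      omega
    rw [if_pos hMp, hm]
    have hA := Aloop (pvMxF 0 p) (p.filter (fun item => !item.isEmpty)) []
    have hstart : (([], PySem.Set.empty) : List (List String) × PySem.Set (List String))
        = (([] : List (List String)), ([] : List (List String))) := rfl
    rw [hstart, hA]
    show ((p.filter (fun item => !item.isEmpty)).filter
        (fun i => pvLen i == pvMxF 0 p)).foldl PySem.Set.add []
      = PySem.Set.ofList (p.filter (fun i => pvLen i == pvMxF 0 p))
  -- combine the two filters and drop the redundant non-emptiness test
    rw [List.filter_filter, show (fun a => pvLen a == pvMxF 0 p && !a.isEmpty) =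
        (fun a => decide (pvLen a = pvMxF 0 p) && !a.isEmpty) from rfl]
    rw [show ∀ l : List (List String), l.filter (fun a => decide (pvLen a = pvMxF 0 p) && !a.isEmpty)
        = l.filter (fun a => pvLen a == pvMxF 0 p) from fun l => filter_len_pos l _ hMp]
    rfl
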